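-- pv_equiv track=rewrite | github.com/moment-of-peace/thesis | my_utils.py | del_linefeed
-- ===== SOURCE A (Python) =====
-- def del_linefeed(string, chara=' '):
--     result = ''
--     for c in string:
--         if c == '\n':
--             result += chara
--         else:
--             result += c
--     return result
-- ===== SOURCE B (Python) =====
-- def del_linefeed(string, chara=' '):
--     return chara.join(string.split('\n'))
-- ===== Notes on version B (the rewrite author's own statement) =====
-- stated objective: idiomatic
-- what changed: Replaces the character-by-character loop with repeated string concatenation by a single split on the newline character followed by a join with chara.
import Mathlib
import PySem

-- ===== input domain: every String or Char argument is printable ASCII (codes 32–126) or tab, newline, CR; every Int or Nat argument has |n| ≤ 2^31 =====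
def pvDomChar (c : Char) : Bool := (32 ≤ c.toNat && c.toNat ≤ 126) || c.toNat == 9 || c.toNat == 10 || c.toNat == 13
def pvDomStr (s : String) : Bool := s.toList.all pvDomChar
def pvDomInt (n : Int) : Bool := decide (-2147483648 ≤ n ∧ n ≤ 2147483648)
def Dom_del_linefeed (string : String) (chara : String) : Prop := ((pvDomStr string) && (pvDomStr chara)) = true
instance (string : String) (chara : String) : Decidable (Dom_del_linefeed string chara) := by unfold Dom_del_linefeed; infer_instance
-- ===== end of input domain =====

-- B replaces A's per-character loop (concatenating onto an accumulator) with split-on-'\n' + join-with-chara.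


-- ===== PORT A =====
-- loop over the characters, appending chara for '\n' and the character itself otherwise
def del_linefeed (string : String) (chara : String) : String :=
  String.ofList (string.toList.foldl
    (fun result c => if c = '\n' then result ++ chara.toList else result ++ [c]) [])

-- ===== PORT B =====
-- chara.join(string.split('\n')); split? is some on the literal nonempty separator "\n"
def del_linefeed_alt (string : String) (chara : String) : String :=
  PySem.Str.join chara ((PySem.Str.split? string "\n").getD [])

-- ===== PRECONDITION & SPEC =====
def Spec_del_linefeed (string : String) (chara : String) (out : String) : Prop := out = del_linefeed_alt string chara
instance (string : String) (chara : String) (out : String) : Decidable (Spec_del_linefeed string chara out) := by unfold Spec_del_linefeed; infer_instance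

-- ===== CLAIM (what is proved, stated in full; the proofs are below) =====
def Claim_equal_del_linefeed : Prop := ∀ (string : String) (chara : String), Dom_del_linefeed string chara → Spec_del_linefeed string chara (del_linefeed string chara)

-- ===== LEMMAS AND PROOFS =====

-- head-extension of the first segment of a split
def pvConsHead (p : List Char) : List (List Char) → List (List Char)
  | [] => [p]
  | s :: ss => (p ++ s) :: ss

-- structural-recursion characterisation of splitting on '\n'
def pvSplitNl : List Char → List (List Char)
  | [] => [[]]
  | c :: rest => if c = '\n' then [] :: pvSplitNl rest else pvConsHead [c] (pvSplitNl rest)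

lemma pvSplitNl_ne_nil (cs : List Char) : pvSplitNl cs ≠ [] := by
  cases cs with
  | nil => simp [pvSplitNl]
  | cons c rest =>
    simp only [pvSplitNl]
    split
    · simp
    · cases h : pvSplitNl rest <;> simp [pvConsHead]

lemma pvConsHead_nil (ss : List (List Char)) (h : ss ≠ []) : pvConsHead [] ss = ss := by
  cases ss with
  | nil => exact absurd rfl h
  | cons s ss => simp [pvConsHead]

lemma pvConsHead_assoc (p : List Char) (c : Char) (ss : List (List Char)) :
    pvConsHead p (pvConsHead [c] ss) = pvConsHead (p ++ [c]) ss := by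
  cases ss <;> simp [pvConsHead]

lemma go_spec : ∀ (fuel : ℕ) (l cur : List Char) (acc : List (List Char)), l.length < fuel →
    PySem.Chars.splitOn.go ['\n'] fuel l cur acc = acc.reverse ++ pvConsHead cur.reverse (pvSplitNl l) := by
  intro fuel
  induction fuel with
  | zero => intro l cur acc h; omega
  | succ fuel ih =>
    intro l cur acc h
    cases l with
    | nil => simp [PySem.Chars.splitOn.go, pvSplitNl, pvConsHead]
    | cons c rest =>
      simp only [PySem.Chars.splitOn.go]
      by_cases hc : c = '\n'
      · subst hc
        rw [if_pos (by simp [List.isPrefixOf])]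
        rw [show List.drop ['\n'].length ('\n' :: rest) = rest from rfl]
        rw [ih rest [] (cur.reverse :: acc) (by simp at h ⊢; omega)]
        obtain ⟨t, ts, hts⟩ : ∃ t ts, pvSplitNl rest = t :: ts := by
          cases h' : pvSplitNl rest with
          | nil => exact absurd h' (pvSplitNl_ne_nil rest)
          | cons t ts => exact ⟨t, ts, rfl⟩
        simp [pvSplitNl, hts, pvConsHead]
      · rw [if_neg (by simp [List.isPrefixOf]; exact fun hh => hc hh.symm)]
        rw [ih rest (c :: cur) acc (by simp at h ⊢; omega)]
        simp [pvSplitNl, hc, List.reverse_cons, pvConsHead_assoc]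

lemma splitOn_nl (cs : List Char) : PySem.Chars.splitOn cs ['\n'] = pvSplitNl cs := by
  unfold PySem.Chars.splitOn
  rw [go_spec (cs.length + 1) cs [] [] (by omega)]
  simp [pvConsHead_nil _ (pvSplitNl_ne_nil cs)]

lemma join_pvSplitNl (cl cs : List Char) :
    PySem.Chars.join cl (pvSplitNl cs) = cs.flatMap (fun c => if c = '\n' then cl else [c]) := by
  induction cs with
  | nil => simp [pvSplitNl, PySem.Chars.join_singleton]
  | cons c rest ih =>
    simp only [pvSplitNl, List.flatMap_cons]
    obtain ⟨s, ss, hss⟩ : ∃ s ss, pvSplitNl rest = s :: ss := by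
      cases h : pvSplitNl rest with
      | nil => exact absurd h (pvSplitNl_ne_nil rest)
      | cons s ss => exact ⟨s, ss, rfl⟩
    by_cases hc : c = '\n'
    · subst hc
      rw [if_pos rfl, if_pos rfl, hss, PySem.Chars.join_cons_cons, ← hss, ih]
      simp
    · rw [if_neg hc, if_neg hc, hss, pvConsHead]
      have hjoin : PySem.Chars.join cl (([c] ++ s) :: ss) = c :: PySem.Chars.join cl (s :: ss) := by
        cases ss with
        | nil => simp [PySem.Chars.join_singleton]
        | cons t ts => simp [PySem.Chars.join_cons_cons]
      rw [hjoin, ← hss, ih]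
      rfl

lemma foldl_char (cl : List Char) (cs : List Char) :
    cs.foldl (fun result c => if c = '\n' then result ++ cl else result ++ [c]) [] =
      cs.flatMap (fun c => if c = '\n' then cl else [c]) := by
  have : (fun (result : List Char) (c : Char) => if c = '\n' then result ++ cl else result ++ [c]) =
      (fun result c => result ++ (if c = '\n' then cl else [c])) := by
    funext result c; split <;> rfl
  rw [this, PySem.List.foldl_append_eq_flatMap]
  simp

-- ===== VERDICT (by name: the statement is the Claim_ definition above) =====
theorem del_linefeed_spec : Claim_equal_del_linefeed := by
  intro string chara _
  unfold Spec_del_linefeed del_linefeed del_linefeed_alt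
  have hsplit : PySem.Str.split? string "\n" =
      some ((pvSplitNl string.toList).map String.ofList) := by
    simp [PySem.Str.split?, PySem.Chars.split?, splitOn_nl]
  rw [hsplit]
  apply String.toList_inj.mp
  rw [PySem.Str.toList_join]
  simp only [Option.getD_some, List.map_map]
  have hcomp : (String.toList ∘ String.ofList) = id := by
    funext l; simp
  rw [hcomp, List.map_id, join_pvSplitNl, String.toList_ofList, foldl_char]
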